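-- pv_equiv track=rewrite | github.com/Yug-Oswal/reward-hacking | py_scripts/compile_v1_RAM_friendly.py | contiguous_bands
-- ===== SOURCE A (Python) =====
-- def contiguous_bands(mask, layers):
--     bands = []
--     start = None
--     for i, m in enumerate(mask):
--         if m and start is None:
--             start = int(layers[i])
--         elif (not m) and start is not None:
--             bands.append((start, int(layers[i - 1])))
--             start = None
--     if start is not None:
--         bands.append((start, int(layers[-1])))
--     return bands
-- ===== SOURCE B (Python) =====
-- def contiguous_bands(mask, layers):
--     ms = list(mask)
--     # rising edges: True here, False (or nothing) just before
--     starts = [i for i, (p, c) in enumerate(zip([False] + ms, ms)) if c and not p]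
--     # falling edges: True here, False (or nothing) just after
--     ends = [i for i, (c, nx) in enumerate(zip(ms, ms[1:] + [False])) if c and not nx]
--     return [(int(layers[s]), int(layers[e])) for s, e in zip(starts, ends)]
-- ===== Notes on version B (the rewrite author's own statement) =====
-- stated objective: alternative
-- what changed: Replaces A's stateful running-start scan (with its trailing-flush special case) by edge detection: two staged passes zip mask against its shifted copies to list rising-edge indices (starts) and falling-edge indices (ends), and the answer is the zip of those two lists mapped through layers; no mutable band state is carried at all.
-- intended difference: When mask ends in a True band and layers[len(mask)-1] differs from layers[-1] (i.e. the lists have mismatched lengths), A's trailing flush returns layers[-1] as the band end while B returns layers[last True index], which is the intended end of that band (it matches how A itself ends every interior band at layers[i-1]). — e.g. on contiguous_bands([true], [5, 9]): A returns [(5, 9)], B returns [(5, 5)]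
-- outside the precondition, e.g. on contiguous_bands([True, True], [3]): A returns [(3, 3)], B raises IndexError
import Mathlib
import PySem

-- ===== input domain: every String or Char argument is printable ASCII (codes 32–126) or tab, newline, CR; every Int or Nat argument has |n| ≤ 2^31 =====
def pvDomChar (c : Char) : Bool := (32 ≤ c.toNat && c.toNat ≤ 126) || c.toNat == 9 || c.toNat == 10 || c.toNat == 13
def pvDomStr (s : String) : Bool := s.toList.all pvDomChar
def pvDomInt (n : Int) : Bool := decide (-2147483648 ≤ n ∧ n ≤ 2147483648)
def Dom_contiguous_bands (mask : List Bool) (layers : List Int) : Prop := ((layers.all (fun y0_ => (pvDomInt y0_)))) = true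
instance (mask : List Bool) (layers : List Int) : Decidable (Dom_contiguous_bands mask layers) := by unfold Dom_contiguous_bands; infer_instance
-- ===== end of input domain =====

-- B replaces A's stateful running-start scan by edge detection: two staged passes over mask
-- zipped with its shifted copies collect rising-edge indices (starts) and falling-edge indices
-- (ends); zipping starts with ends and mapping through layers yields the bands (objective:
-- alternative; same cost, no band state and no trailing-flush special case).

-- ===== PORT A =====
-- loop body of A's for-loop over enumerate(mask); state = (bands, start)
def pvStepA (layers : List Int) (st : List (Int × Int) × Option Int) (im : Int × Bool) :
    List (Int × Int) × Option Int :=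
  if im.2 && st.2.isNone then (st.1, some (PySem.List.pyGetD layers im.1 0))
  else if (!im.2) && st.2.isSome then
    (st.1 ++ [(st.2.getD 0, PySem.List.pyGetD layers (im.1 - 1) 0)], none)
  else st

-- A's trailing flush: `if start is not None: bands.append((start, int(layers[-1])))`
def pvFinA (layers : List Int) (st : List (Int × Int) × Option Int) : List (Int × Int) :=
  match st.2 with
  | some s => st.1 ++ [(s, PySem.List.pyGetD layers (-1) 0)]
  | none => st.1

def contiguous_bands (mask : List Bool) (layers : List Int) : List (Int × Int) :=
  pvFinA layers ((PySem.List.enumerate mask 0).foldl (pvStepA layers) ([], none))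

-- ===== PORT B =====
-- `[i for i, (p, c) in enumerate(zip([False] + ms, ms)) if c and not p]`
def pvStarts (mask : List Bool) : List Int :=
  ((PySem.List.enumerate (List.zip (false :: mask) mask) 0).filter
    (fun ip => ip.2.2 && !ip.2.1)).map (·.1)

-- `[i for i, (c, nx) in enumerate(zip(ms, ms[1:] + [False])) if c and not nx]`
def pvEnds (mask : List Bool) : List Int :=
  ((PySem.List.enumerate (List.zip mask (PySem.List.slice mask (some 1) none ++ [false])) 0).filter
    (fun ip => ip.2.1 && !ip.2.2)).map (·.1)

def contiguous_bands_alt (mask : List Bool) (layers : List Int) : List (Int × Int) :=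
  ((pvStarts mask).zip (pvEnds mask)).map
    (fun se => (PySem.List.pyGetD layers se.1 0, PySem.List.pyGetD layers se.2 0))

-- ===== PRECONDITION & SPEC =====
-- Pre_ excludes inputs where some True index of mask is not a valid index into layers: there
-- either program raises IndexError, except that A accidentally returns a value when only the
-- non-first indices of the FINAL band overflow layers (it never reads layers there and uses
-- layers[-1] for the band end instead); B naturally raises IndexError on those inputs.
def Pre_contiguous_bands (mask : List Bool) (layers : List Int) : Prop :=
  ∀ i, i < mask.length → mask.getD i false = true → i < layers.length
instance (mask : List Bool) (layers : List Int) : Decidable (Pre_contiguous_bands mask layers) := by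
  unfold Pre_contiguous_bands; infer_instance

def pvWitness_contiguous_bands : List Bool × List Int := ([true, false], [3, 4])

-- When mask ends in a True band and layers[len(mask)-1] ≠ layers[-1] (mismatched lengths), A's
-- trailing flush returns layers[-1] as the band end while B returns layers[last True index],
-- which is the intended band end (A itself ends every interior band at layers[i-1]).
def D_contiguous_bands (mask : List Bool) (layers : List Int) : Prop :=
  mask.getLast? = some true ∧
    PySem.List.pyGetD layers ((mask.length : Int) - 1) 0 ≠ PySem.List.pyGetD layers (-1) 0
instance (mask : List Bool) (layers : List Int) : Decidable (D_contiguous_bands mask layers) := by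
  unfold D_contiguous_bands; infer_instance

def Spec_contiguous_bands (mask : List Bool) (layers : List Int) (out : List (Int × Int)) : Prop :=
  ¬ D_contiguous_bands mask layers → out = contiguous_bands_alt mask layers
instance (mask : List Bool) (layers : List Int) (out : List (Int × Int)) :
    Decidable (Spec_contiguous_bands mask layers out) := by
  unfold Spec_contiguous_bands; infer_instance

def pvDiffWitness_contiguous_bands : List Bool × List Int := ([true], [5, 9])
def pvDiffWitnessOut_contiguous_bands : (List (Int × Int)) × (List (Int × Int)) :=
  ([(5, 9)], [(5, 5)])

-- ===== CLAIM (what is proved, stated in full; the proofs are below) =====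
def Claim_unchanged_contiguous_bands : Prop := ∀ (mask : List Bool) (layers : List Int), Dom_contiguous_bands mask layers → Pre_contiguous_bands mask layers → Spec_contiguous_bands mask layers (contiguous_bands mask layers)
def Claim_changed_contiguous_bands : Prop := Dom_contiguous_bands (pvDiffWitness_contiguous_bands.1) (pvDiffWitness_contiguous_bands.2) ∧ Pre_contiguous_bands (pvDiffWitness_contiguous_bands.1) (pvDiffWitness_contiguous_bands.2) ∧ D_contiguous_bands (pvDiffWitness_contiguous_bands.1) (pvDiffWitness_contiguous_bands.2) ∧ contiguous_bands (pvDiffWitness_contiguous_bands.1) (pvDiffWitness_contiguous_bands.2) = pvDiffWitnessOut_contiguous_bands.1 ∧ contiguous_bands_alt (pvDiffWitness_contiguous_bands.1) (pvDiffWitness_contiguous_bands.2) = pvDiffWitnessOut_contiguous_bands.2 ∧ pvDiffWitnessOut_contiguous_bands.1 ≠ pvDiffWitnessOut_contiguous_bands.2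
def Claim_exact_contiguous_bands : Prop := ∀ (mask : List Bool) (layers : List Int), Dom_contiguous_bands mask layers → Pre_contiguous_bands mask layers → D_contiguous_bands mask layers → contiguous_bands mask layers ≠ contiguous_bands_alt mask layers

-- ===== LEMMAS AND PROOFS =====

-- Reference recursion both ports are reduced to: state = none (outside a band) or
-- some (startLayer, lastTrueIndex); useNeg chooses A's flush value layers[-1] vs B's layers[last].
def pvRun (layers : List Int) (useNeg : Bool) : Option (Int × Int) → Int → List Bool → List (Int × Int)
  | none, _, [] => []
  | some st, _, [] =>
      [(st.1, if useNeg then PySem.List.pyGetD layers (-1) 0 else PySem.List.pyGetD layers st.2 0)]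
  | none, n, false :: t => pvRun layers useNeg none (n + 1) t
  | none, n, true :: t => pvRun layers useNeg (some (PySem.List.pyGetD layers n 0, n)) (n + 1) t
  | some st, n, true :: t => pvRun layers useNeg (some (st.1, n)) (n + 1) t
  | some st, n, false :: t =>
      (st.1, PySem.List.pyGetD layers st.2 0) :: pvRun layers useNeg none (n + 1) t

theorem lemA (layers : List Int) :
    ∀ (t : List Bool) (n : Int) (bands : List (Int × Int)),
      (pvFinA layers ((PySem.List.enumerate t n).foldl (pvStepA layers) (bands, none)) =
        bands ++ pvRun layers true none n t) ∧
      (∀ s : Int,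
        pvFinA layers ((PySem.List.enumerate t n).foldl (pvStepA layers) (bands, some s)) =
          bands ++ pvRun layers true (some (s, n - 1)) n t) := by
  intro t
  induction t with
  | nil =>
    intro n bands
    refine ⟨?_, fun s => ?_⟩
    · simp [PySem.List.enumerate_nil, pvFinA, pvRun]
    · simp [PySem.List.enumerate_nil, pvFinA, pvRun]
  | cons m t ih =>
    intro n bands
    refine ⟨?_, fun s => ?_⟩
    · rw [PySem.List.enumerate_cons, List.foldl_cons]
      cases m
      · have hstep : pvStepA layers (bands, none) (n, false) = (bands, none) := by
          simp [pvStepA]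
        rw [hstep, (ih (n + 1) bands).1]
        simp [pvRun]
      · have hstep : pvStepA layers (bands, none) (n, true) =
            (bands, some (PySem.List.pyGetD layers n 0)) := by
          simp [pvStepA]
        rw [hstep, (ih (n + 1) bands).2 (PySem.List.pyGetD layers n 0)]
        simp [pvRun]
    · rw [PySem.List.enumerate_cons, List.foldl_cons]
      cases m
      · have hstep : pvStepA layers (bands, some s) (n, false) =
            (bands ++ [(s, PySem.List.pyGetD layers (n - 1) 0)], none) := by
          simp [pvStepA]
        rw [hstep, (ih (n + 1) (bands ++ [(s, PySem.List.pyGetD layers (n - 1) 0)])).1]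
        simp [pvRun]
      · have hstep : pvStepA layers (bands, some s) (n, true) = (bands, some s) := by
          simp [pvStepA]
        rw [hstep, (ih (n + 1) bands).2 s]
        simp [pvRun]

-- recursion-form of B's starts pass: rising-edge indices given the previous mask value
def pvStartsOf (prev : Bool) : List Bool → Int → List Int
  | [], _ => []
  | b :: t, n => if b && !prev then n :: pvStartsOf b t (n + 1) else pvStartsOf b t (n + 1)

-- recursion-form of B's ends pass: falling-edge indices (lookahead = head of the tail, or False)
def pvEndsOf : List Bool → Int → List Int
  | [], _ => []
  | b :: t, n => if b && !(t.headD false) then n :: pvEndsOf t (n + 1) else pvEndsOf t (n + 1)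

theorem startsEq :
    ∀ (t : List Bool) (p : Bool) (n : Int),
      ((PySem.List.enumerate (List.zip (p :: t) t) n).filter
        (fun ip => ip.2.2 && !ip.2.1)).map (·.1) = pvStartsOf p t n := by
  intro t
  induction t with
  | nil => intro p n; simp [PySem.List.enumerate_nil, pvStartsOf]
  | cons b t ih =>
    intro p n
    rw [show List.zip (p :: b :: t) (b :: t) = (p, b) :: List.zip (b :: t) t from rfl,
      PySem.List.enumerate_cons]
    simp only [pvStartsOf, List.filter_cons]
    by_cases hc : (b && !p) = true
    · simp only [hc, if_true]
      simp only [List.map_cons, ih b (n + 1)]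
    · simp only [hc]
      simp only [Bool.not_eq_true] at hc
      simp [ih b (n + 1)]

theorem endsEq :
    ∀ (t : List Bool) (n : Int),
      ((PySem.List.enumerate (List.zip t (t.tail ++ [false])) n).filter
        (fun ip => ip.2.1 && !ip.2.2)).map (·.1) = pvEndsOf t n := by
  intro t
  induction t with
  | nil => intro n; simp [PySem.List.enumerate_nil, pvEndsOf]
  | cons b t ih =>
    intro n
    have hzip : List.zip (b :: t) ((b :: t).tail ++ [false]) =
        (b, t.headD false) :: List.zip t (t.tail ++ [false]) := by
      cases t with
      | nil => rfl
      | cons c t' => rfl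
    rw [hzip, PySem.List.enumerate_cons]
    simp only [pvEndsOf, List.filter_cons]
    by_cases hc : (b && !(t.headD false)) = true
    · simp only [hc, if_true]
      simp only [List.map_cons, ih (n + 1)]
    · simp only [hc]
      simp only [Bool.not_eq_true] at hc
      simp [ih (n + 1)]

-- the edge pairing equals the reference recursion (useNeg = false)
theorem pairEq (layers : List Int) :
    ∀ (N : Nat) (t : List Bool), t.length ≤ N → ∀ (n : Int),
      (((pvStartsOf false t n).zip (pvEndsOf t n)).map
          (fun se => (PySem.List.pyGetD layers se.1 0, PySem.List.pyGetD layers se.2 0)) =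
        pvRun layers false none n t) ∧
      (∀ s : Int, t.head? = some true →
        (((s :: pvStartsOf true t n).zip (pvEndsOf t n)).map
            (fun se => (PySem.List.pyGetD layers se.1 0, PySem.List.pyGetD layers se.2 0)) =
          pvRun layers false (some (PySem.List.pyGetD layers s 0, n - 1)) n t)) := by
  intro N
  induction N with
  | zero =>
    intro t ht n
    have : t = [] := List.length_eq_zero_iff.mp (Nat.le_zero.mp ht)
    subst this
    exact ⟨by simp [pvStartsOf, pvEndsOf, pvRun], fun s h => by simp at h⟩
  | succ N ih =>
    intro t ht n
    cases t with
    | nil => exact ⟨by simp [pvStartsOf, pvEndsOf, pvRun], fun s h => by simp at h⟩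
    | cons b t' =>
      have ht' : t'.length ≤ N := by simp at ht; omega
      refine ⟨?_, fun s hh => ?_⟩
      · cases b
        · -- still outside a band
          simp only [pvStartsOf, pvEndsOf, Bool.false_and] at *
          rw [show pvRun layers false none n (false :: t') =
            pvRun layers false none (n + 1) t' from rfl]
          exact (ih t' ht' (n + 1)).1
        · -- rising edge at n
          cases hth : t'.head? with
          | some v =>
            cases v
            · -- next is False: also a falling edge at n
              obtain ⟨t3, ht3⟩ : ∃ t3, t' = false :: t3 := by
                cases t' with
                | nil => simp at hth
                | cons c t3 => simp at hth; exact ⟨t3, by rw [hth]⟩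
              subst ht3
              have ht3len : t3.length ≤ N := by simp at ht; omega
              rw [show pvStartsOf false (true :: false :: t3) n =
                n :: pvStartsOf false t3 (n + 1 + 1) from rfl]
              rw [show pvEndsOf (true :: false :: t3) n =
                n :: pvEndsOf t3 (n + 1 + 1) from by simp [pvEndsOf]]
              rw [show pvRun layers false none n (true :: false :: t3) =
                (PySem.List.pyGetD layers n 0, PySem.List.pyGetD layers n 0) ::
                  pvRun layers false none (n + 1 + 1) t3 from rfl]
              simp only [List.zip_cons_cons, List.map_cons]
              rw [(ih t3 ht3len (n + 1 + 1)).1]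
            · -- next is True: band continues
              rw [show pvStartsOf false (true :: t') n = n :: pvStartsOf true t' (n + 1) from rfl]
              rw [show pvEndsOf (true :: t') n = pvEndsOf t' (n + 1) from by
                cases t' with
                | nil => simp at hth
                | cons c t3 => simp at hth; simp [pvEndsOf, hth]]
              rw [show pvRun layers false none n (true :: t') =
                pvRun layers false (some (PySem.List.pyGetD layers n 0, n)) (n + 1) t' from rfl]
              have h := (ih t' ht' (n + 1)).2 n hth
              rw [show (n + 1 : Int) - 1 = n by omega] at h
              exact h
          | none =>
            -- singleton True band at the end
            have : t' = [] := by cases t' with | nil => rfl | cons c t3 => simp at hth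
            subst this
            simp [pvStartsOf, pvEndsOf, pvRun]
      · -- inside a band, pending start index s; head of t is True
        have hb : b = true := by simpa using hh
        subst hb
        rw [show pvStartsOf true (true :: t') n = pvStartsOf true t' (n + 1) from rfl]
        rw [show pvRun layers false (some (PySem.List.pyGetD layers s 0, n - 1)) n (true :: t') =
          pvRun layers false (some (PySem.List.pyGetD layers s 0, n)) (n + 1) t' from rfl]
        cases hth : t'.head? with
        | some v =>
          cases v
          · -- falling edge at n
            obtain ⟨t3, ht3⟩ : ∃ t3, t' = false :: t3 := by
              cases t' with
              | nil => simp at hth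
              | cons c t3 => simp at hth; exact ⟨t3, by rw [hth]⟩
            subst ht3
            have ht3len : t3.length ≤ N := by simp at ht; omega
            rw [show pvEndsOf (true :: false :: t3) n =
              n :: pvEndsOf t3 (n + 1 + 1) from by simp [pvEndsOf]]
            rw [show pvStartsOf true (false :: t3) (n + 1) =
              pvStartsOf false t3 (n + 1 + 1) from rfl]
            rw [show pvRun layers false (some (PySem.List.pyGetD layers s 0, n)) (n + 1)
                (false :: t3) =
              (PySem.List.pyGetD layers s 0, PySem.List.pyGetD layers n 0) ::
                pvRun layers false none (n + 1 + 1) t3 from rfl]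
            simp only [List.zip_cons_cons, List.map_cons]
            rw [(ih t3 ht3len (n + 1 + 1)).1]
          · -- band continues
            rw [show pvEndsOf (true :: t') n = pvEndsOf t' (n + 1) from by
              cases t' with
              | nil => simp at hth
              | cons c t3 => simp at hth; simp [pvEndsOf, hth]]
            have h := (ih t' ht' (n + 1)).2 s hth
            rw [show (n + 1 : Int) - 1 = n by omega] at h
            exact h
        | none =>
          -- band ends with the list
          have : t' = [] := by cases t' with | nil => rfl | cons c t3 => simp at hth
          subst this
          simp [pvStartsOf, pvEndsOf, pvRun]

theorem eqRunM (layers : List Int) (M : Int)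
    (hg : PySem.List.pyGetD layers (M - 1) 0 = PySem.List.pyGetD layers (-1) 0) :
    ∀ (t : List Bool) (n : Int), n + (t.length : Int) = M →
      (pvRun layers true none n t = pvRun layers false none n t) ∧
      (∀ s : Int, pvRun layers true (some (s, n - 1)) n t =
        pvRun layers false (some (s, n - 1)) n t) := by
  intro t
  induction t with
  | nil =>
    intro n hn
    simp only [List.length_nil, Nat.cast_zero, add_zero] at hn
    refine ⟨rfl, fun s => ?_⟩
    simp [pvRun]
    rw [show n - 1 = M - 1 by omega, hg]
  | cons m t ih =>
    intro n hn
    have hn' : (n + 1) + (t.length : Int) = M := by simp at hn ⊢; omega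
    refine ⟨?_, fun s => ?_⟩
    · cases m
      · exact (ih (n + 1) hn').1
      · have h := (ih (n + 1) hn').2 (PySem.List.pyGetD layers n 0)
        simp only [pvRun]
        rw [show (n + 1 : Int) - 1 = n by omega] at h
        exact h
    · cases m
      · simp only [pvRun]
        rw [(ih (n + 1) hn').1]
      · have h := (ih (n + 1) hn').2 s
        simp only [pvRun]
        rw [show (n + 1 : Int) - 1 = n by omega] at h
        exact h

theorem eqRunNoEnd (layers : List Int) :
    ∀ (t : List Bool) (n : Int), t.getLast? ≠ some true →
      (pvRun layers true none n t = pvRun layers false none n t) ∧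
      (∀ s : Int, t ≠ [] → pvRun layers true (some (s, n - 1)) n t =
        pvRun layers false (some (s, n - 1)) n t) := by
  intro t
  induction t with
  | nil => intro n _; exact ⟨rfl, fun s h => absurd rfl h⟩
  | cons m t ih =>
    intro n hl
    cases t with
    | nil =>
      cases m
      · exact ⟨rfl, fun s _ => rfl⟩
      · simp at hl
    | cons c t' =>
      have hl' : (c :: t').getLast? ≠ some true := by
        rwa [List.getLast?_cons_cons] at hl
      have ih' := ih (n + 1) hl'
      refine ⟨?_, fun s _ => ?_⟩
      · cases m
        · exact ih'.1
        · have h := ih'.2 (PySem.List.pyGetD layers n 0) (by simp)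
          simp only [pvRun]
          rw [show (n + 1 : Int) - 1 = n by omega] at h
          exact h
      · cases m
        · simp only [pvRun]
          rw [ih'.1]
        · have h := ih'.2 s (by simp)
          simp only [pvRun]
          rw [show (n + 1 : Int) - 1 = n by omega] at h
          exact h

theorem runLast (layers : List Int) (u : Bool) :
    ∀ (t : List Bool) (n : Int), t.getLast? = some true →
      ((pvRun layers u none n t).getLast?.map Prod.snd =
        some (if u then PySem.List.pyGetD layers (-1) 0
              else PySem.List.pyGetD layers (n + (t.length : Int) - 1) 0)) ∧
      (∀ s last : Int, (pvRun layers u (some (s, last)) n t).getLast?.map Prod.snd =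
        some (if u then PySem.List.pyGetD layers (-1) 0
              else PySem.List.pyGetD layers (n + (t.length : Int) - 1) 0)) := by
  intro t
  induction t with
  | nil => intro n h; simp at h
  | cons m t ih =>
    intro n hl
    cases t with
    | nil =>
      cases m
      · simp at hl
      · refine ⟨?_, fun s last => ?_⟩ <;> simp [pvRun]
    | cons c t' =>
      have hl' : (c :: t').getLast? = some true := by
        rwa [List.getLast?_cons_cons] at hl
      have ih' := ih (n + 1) hl'
      have harith : (n + 1) + ((c :: t').length : Int) - 1 =
          n + ((m :: c :: t').length : Int) - 1 := by simp; omega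
      refine ⟨?_, fun s last => ?_⟩
      · cases m
        · rw [show pvRun layers u none n (false :: c :: t') =
            pvRun layers u none (n + 1) (c :: t') from rfl]
          rw [ih'.1, harith]
        · rw [show pvRun layers u none n (true :: c :: t') =
            pvRun layers u (some (PySem.List.pyGetD layers n 0, n)) (n + 1) (c :: t') from rfl]
          rw [ih'.2 _ _, harith]
      · cases m
        · rw [show pvRun layers u (some (s, last)) n (false :: c :: t') =
            (s, PySem.List.pyGetD layers last 0) :: pvRun layers u none (n + 1) (c :: t') from rfl]
          cases hr : pvRun layers u none (n + 1) (c :: t') with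
          | nil => rw [hr] at ih'; have := ih'.1; simp at this
          | cons y ys =>
            rw [List.getLast?_cons_cons]
            have h1 := ih'.1
            rw [hr] at h1
            rw [h1, harith]
        · rw [show pvRun layers u (some (s, last)) n (true :: c :: t') =
            pvRun layers u (some (s, n)) (n + 1) (c :: t') from rfl]
          rw [ih'.2 _ _, harith]

theorem A_eq_run (mask : List Bool) (layers : List Int) :
    contiguous_bands mask layers = pvRun layers true none 0 mask := by
  have h := (lemA layers mask 0 []).1
  simpa [contiguous_bands] using h

theorem B_eq_run (mask : List Bool) (layers : List Int) :
    contiguous_bands_alt mask layers = pvRun layers false none 0 mask := by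
  have hs : pvStarts mask = pvStartsOf false mask 0 := startsEq mask false 0
  have he : pvEnds mask = pvEndsOf mask 0 := by
    have := endsEq mask 0
    rw [pvEnds, PySem.List.slice_from_one]
    exact this
  rw [contiguous_bands_alt, hs, he]
  exact (pairEq layers mask.length mask le_rfl 0).1

-- ===== VERDICT (by name: the statement is the Claim_ definition above) =====
theorem contiguous_bands_spec : Claim_unchanged_contiguous_bands := by
  intro mask layers _ _ hnd
  rw [A_eq_run, B_eq_run]
  by_cases hend : mask.getLast? = some true
  · have hg : PySem.List.pyGetD layers ((mask.length : Int) - 1) 0 =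
        PySem.List.pyGetD layers (-1) 0 := by
      by_contra hne
      exact hnd ⟨hend, hne⟩
    exact (eqRunM layers (mask.length : Int) hg mask 0 (by simp)).1
  · exact (eqRunNoEnd layers mask 0 hend).1

theorem contiguous_bands_changed : Claim_changed_contiguous_bands := by
  unfold Claim_changed_contiguous_bands; decide

theorem contiguous_bands_tight : Claim_exact_contiguous_bands := by
  intro mask layers _ _ hd heq
  obtain ⟨hend, hne⟩ := hd
  have hA := (runLast layers true mask 0 hend).1
  have hB := (runLast layers false mask 0 hend).1
  rw [← A_eq_run] at hA
  rw [← B_eq_run] at hB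
  rw [heq, hB] at hA
  simp at hA
  exact hne hA
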